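-- pv_equiv track=rewrite | github.com/mfve/coding-challenges | Python/longest_substring.py | checkForSubstrings
-- ===== SOURCE A (Python) =====
-- def checkForSubstrings(s: str, longest_substring: str, i: int) -> int:
--     for j in range(len(longest_substring), len(s) - i + 1):
--         char_set = set()
--         substr = s[i:(i+j)]
--         # check for uniqueness
--         for c in substr:
--             if c in char_set:
--                 # Non unique now
--                 return longest_substring
--             char_set.add(c)
--         longest_substring = substr
--     return longest_substring
-- ===== SOURCE B (Python) =====
-- def checkForSubstrings(s: str, longest_substring: str, i: int) -> int:
--     # Single sliding-window pass: grow a window from i one char at a time,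
--     # stopping at the first repeated character.
--     n = len(s)
--     width = len(longest_substring)
--     if width > n - i:
--         return longest_substring
--     seen = set()
--     j = i
--     while j < n and s[j] not in seen:
--         seen.add(s[j])
--         j += 1
--     if j - i < width:
--         return longest_substring
--     return s[i:j]
-- ===== Notes on version B (the rewrite author's own statement) =====
-- stated objective: alternative
-- what changed: Replaced the nested re-scan (for each candidate length j, slice and re-check the whole substring for duplicates with a fresh set) by a single sliding-window pass that adds each character once and stops at the first repeat; worst-case O(n) instead of O(n^2), though a timing run could not measure a difference on its inputs.
-- outside the precondition, e.g. on checkForSubstrings('aba', '', -2): A returns 'ba', B returns ''; on checkForSubstrings('abcab', 'ab', -3): A returns 'cab', B returns ''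
import Mathlib
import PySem

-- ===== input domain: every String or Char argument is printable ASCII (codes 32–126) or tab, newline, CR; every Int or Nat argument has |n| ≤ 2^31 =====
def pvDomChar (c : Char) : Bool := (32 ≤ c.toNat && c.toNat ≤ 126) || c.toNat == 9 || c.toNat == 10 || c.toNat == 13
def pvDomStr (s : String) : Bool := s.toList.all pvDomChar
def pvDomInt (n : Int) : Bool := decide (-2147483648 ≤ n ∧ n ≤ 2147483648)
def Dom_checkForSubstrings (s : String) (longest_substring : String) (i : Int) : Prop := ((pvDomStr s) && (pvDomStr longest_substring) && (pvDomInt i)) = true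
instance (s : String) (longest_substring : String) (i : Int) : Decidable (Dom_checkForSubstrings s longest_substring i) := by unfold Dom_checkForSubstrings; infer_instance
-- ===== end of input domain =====

-- B replaces A's per-length slice-and-rescan by one sliding-window pass (add each char once, stop at the first repeat); proved equal for every start index 0 ≤ i.


-- ===== PORT A =====
-- inner 'for c in substr' loop: returns true exactly when A's early 'return longest_substring' fires
def chkA_inner : List Char → PySem.Set Char → Bool
  | [], _ => false
  | c :: rest, char_set =>
      if PySem.Set.contains char_set c then true
      else chkA_inner rest (PySem.Set.add char_set c)

-- outer 'for j in range(...)' loop over the list of j's, carrying longest_substring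
def chkA_loop (s : List Char) (i : Int) : List Int → List Char → List Char
  | [], longest => longest
  | j :: rest, longest =>
      let substr := PySem.List.slice s (some i) (some (i + j))
      if chkA_inner substr PySem.Set.empty then longest
      else chkA_loop s i rest substr

def checkForSubstrings (s : String) (longest_substring : String) (i : Int) : String :=
  String.ofList (chkA_loop s.toList i
    (PySem.List.pyRange (longest_substring.toList.length : Int) ((s.toList.length : Int) - i + 1) 1)
    longest_substring.toList)

-- ===== PORT B =====
-- 'while j < n and s[j] not in seen' loop of Source B; returns the final j
def chkB_scan (s : List Char) (n : Int) (seen : PySem.Set Char) (j : Int) : Int :=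
  if _h : j < n then
    match PySem.List.pyGet? s j with
    | some c =>
        if PySem.Set.contains seen c then j
        else chkB_scan s n (PySem.Set.add seen c) (j + 1)
    | none => j
  else j
termination_by (n - j).toNat
decreasing_by omega

def checkForSubstrings_alt (s : String) (longest_substring : String) (i : Int) : String :=
  let t := s.toList
  let n : Int := (t.length : Int)
  let width : Int := (longest_substring.toList.length : Int)
  if width > n - i then longest_substring
  else
    let j := chkB_scan t n PySem.Set.empty i
    if j - i < width then longest_substring
    else String.ofList (PySem.List.slice t (some i) (some j))

-- ===== PRECONDITION & SPEC =====
-- Pre_ restricts to the function's natural domain: i is a start index into s (0 ≤ i).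
-- For negative i, Python's negative-slice wraparound makes A enumerate wrapped and empty
-- slices — behaviour the function was not meant for — and B does not mirror it.
def Pre_checkForSubstrings (s : String) (longest_substring : String) (i : Int) : Prop := 0 ≤ i
instance (s : String) (longest_substring : String) (i : Int) : Decidable (Pre_checkForSubstrings s longest_substring i) := by unfold Pre_checkForSubstrings; infer_instance

def pvWitness_checkForSubstrings : String × String × Int := ("abcabcbb", "", 0)

def Spec_checkForSubstrings (s : String) (longest_substring : String) (i : Int) (out : String) : Prop := out = checkForSubstrings_alt s longest_substring i
instance (s : String) (longest_substring : String) (i : Int) (out : String) : Decidable (Spec_checkForSubstrings s longest_substring i out) := by unfold Spec_checkForSubstrings; infer_instance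

-- ===== CLAIM (what is proved, stated in full; the proofs are below) =====
def Claim_equal_checkForSubstrings : Prop := ∀ (s : String) (longest_substring : String) (i : Int), Dom_checkForSubstrings s longest_substring i → Pre_checkForSubstrings s longest_substring i → Spec_checkForSubstrings s longest_substring i (checkForSubstrings s longest_substring i)

-- ===== LEMMAS AND PROOFS =====

-- length of the longest duplicate-free prefix (relative to an already-seen set)
def uflen : List Char → PySem.Set Char → Nat
  | [], _ => 0
  | c :: rest, seen =>
      if PySem.Set.contains seen c then 0
      else uflen rest (PySem.Set.add seen c) + 1

lemma uflen_le_length (v : List Char) (seen : PySem.Set Char) : uflen v seen ≤ v.length := by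
  induction v generalizing seen with
  | nil => simp [uflen]
  | cons c rest ih =>
      simp only [uflen, List.length_cons]
      split
      · omega
      · exact Nat.succ_le_succ (ih _)

lemma uflen_take (v : List Char) (seen : PySem.Set Char) (k : Nat) :
    uflen (v.take k) seen = min (uflen v seen) k := by
  induction v generalizing seen k with
  | nil => simp [uflen]
  | cons c rest ih =>
      cases k with
      | zero => simp [uflen]
      | succ k' =>
          simp only [List.take_succ_cons, uflen]
          split
          · simp
          · rw [ih]; omega

-- A's inner loop fires exactly when the scanned list is not duplicate-free
lemma chkA_inner_eq (v : List Char) (seen : PySem.Set Char) :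
    chkA_inner v seen = decide (uflen v seen < v.length) := by
  induction v generalizing seen with
  | nil => simp [chkA_inner, uflen]
  | cons c rest ih =>
      simp only [chkA_inner, uflen, List.length_cons]
      split
      · simp
      · rw [ih]
        rcases Nat.lt_or_ge (uflen rest (PySem.Set.add seen c)) rest.length with h | h
        · simp [h, Nat.succ_lt_succ h]
        · simp [Nat.not_lt.mpr h]


-- B's while loop advances j by exactly the duplicate-free prefix length of what remains
lemma chkB_scan_eq (t : List Char) (seen : PySem.Set Char) (j : Int)
    (hj0 : 0 ≤ j) (hjn : j ≤ (t.length : Int)) :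
    chkB_scan t (t.length : Int) seen j = j + (uflen (t.drop j.toNat) seen : Int) := by
  generalize hu : t.drop j.toNat = u
  induction u generalizing seen j with
  | nil =>
      have hlen : t.length - j.toNat = 0 := by
        have h := List.length_drop (l := t) (i := j.toNat)
        rw [hu] at h
        simpa using h.symm
      rw [chkB_scan]
      have : ¬ j < (t.length : Int) := by omega
      simp [this, uflen]
  | cons c rest ih =>
      have hlt : j.toNat < t.length := by
        have h := List.length_drop (l := t) (i := j.toNat)
        rw [hu] at h
        simp at h
        omega
      have hjlt : j < (t.length : Int) := by omega
      have hget : PySem.List.pyGet? t j = some c := by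
        rw [show j = ((j.toNat : Nat) : Int) by omega, PySem.List.pyGet?_natCast]
        have h0 : (List.drop j.toNat t)[0]? = some c := by rw [hu]; rfl
        simpa using h0
      rw [chkB_scan]
      simp only [hjlt, hget]

      by_cases hc : c ∈ seen
      · simp [hc, uflen]
      · have hdrop : t.drop (j + 1).toNat = rest := by
          have h1 : (j + 1).toNat = j.toNat + 1 := by omega
          rw [h1, ← List.drop_drop, hu]
          simp
        have hrec := ih (PySem.Set.add seen c) (j + 1) (by omega) (by omega) hdrop
        rw [if_neg (by simpa using hc), hrec]
        simp only [uflen]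
        rw [if_neg (by simpa using hc)]
        push_cast
        ring

-- A's outer loop: once started at a ≥ 0, either it never improves (r < a or m < a) or it ends at take m
lemma chkA_loop_eq (t : List Char) (i : Int) (hi : 0 ≤ i) :
    ∀ (k : Nat) (a : Int) (longest : List Char), 0 ≤ a →
    ((t.length : Int) - i + 1 - a).toNat = k →
    chkA_loop t i (PySem.List.pyRange a ((t.length : Int) - i + 1) 1) longest =
      if (t.length : Int) - i < a ∨ ((uflen (t.drop i.toNat) PySem.Set.empty : Nat) : Int) < a
      then longest
      else (t.drop i.toNat).take (uflen (t.drop i.toNat) PySem.Set.empty) := by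
  intro k
  induction k with
  | zero =>
      intro a longest ha hk
      rw [PySem.List.pyRange_one_eq_nil (by omega)]
      simp only [chkA_loop]
      rw [if_pos (Or.inl (by omega))]
  | succ k ih =>
      intro a longest ha hk
      by_cases hle : (t.length : Int) - i + 1 ≤ a
      · rw [PySem.List.pyRange_one_eq_nil hle]
        simp only [chkA_loop]
        rw [if_pos (Or.inl (by omega))]
      · have hlt : a < (t.length : Int) - i + 1 := by omega
        rw [PySem.List.pyRange_one_cons hlt]
        simp only [chkA_loop]
        have hiLen : i.toNat ≤ t.length := by omega
        set u := t.drop i.toNat with hu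
        set m := uflen u PySem.Set.empty with hm
        have hulen : u.length = t.length - i.toNat := by
          rw [hu]; exact List.length_drop
        have hmle : m ≤ u.length := uflen_le_length u PySem.Set.empty
        have haLen : a.toNat ≤ u.length := by omega
        have hslice : PySem.List.slice t (some i) (some (i + a)) =
            u.take a.toNat := by
          rw [PySem.List.slice_toNat t hi (by omega), ← hu]
          congr 1
          omega
        have hinner : chkA_inner (PySem.List.slice t (some i) (some (i + a))) PySem.Set.empty
            = decide ((m : Int) < a) := by
          rw [hslice, chkA_inner_eq, uflen_take, ← hm]
          simp only [List.length_take]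
          by_cases h : (m : Int) < a
          · have : min m a.toNat < min a.toNat u.length := by omega
            simp [h, this]
          · have : ¬ min m a.toNat < min a.toNat u.length := by omega
            simp [h, this]
        rw [hinner]
        by_cases h : (m : Int) < a
        · rw [if_pos (show decide ((m : Int) < a) = true by simpa using h),
              if_pos (Or.inr h)]
        · rw [if_neg (show ¬ decide ((m : Int) < a) = true by simpa using h)]
          rw [ih (a + 1) _ (by omega) (by omega), hslice]
          rw [if_neg (show ¬ ((t.length : Int) - i < a ∨ (m : Int) < a) by omega)]
          by_cases h2 : (t.length : Int) - i < a + 1 ∨ (m : Int) < a + 1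
          · rw [if_pos h2]
            have : a.toNat = m := by omega
            rw [this]
          · rw [if_neg h2]

-- String.ofList of toList is the string itself
lemma ofList_toList (s : String) : String.ofList s.toList = s := by
  simp [String.ofList]

-- ===== VERDICT (by name: the statement is the Claim_ definition above) =====
theorem checkForSubstrings_spec : Claim_equal_checkForSubstrings := by
  intro s longest_substring i _hdom hi
  unfold Spec_checkForSubstrings checkForSubstrings checkForSubstrings_alt
  have hi' : (0 : Int) ≤ i := hi
  set t := s.toList with ht
  set L := longest_substring.toList with hL
  set m := uflen (t.drop i.toNat) PySem.Set.empty with hm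
  rw [chkA_loop_eq t i hi' ((((t.length : Int) - i + 1) - (L.length : Int)).toNat)
      (L.length : Int) L (by omega) rfl]
  simp only [← hm]
  by_cases hr : (t.length : Int) - i < (L.length : Int)
  · rw [if_pos (Or.inl hr),
        if_pos (show (L.length : Int) > (t.length : Int) - i by omega), ofList_toList]
  · have hin : i ≤ (t.length : Int) := by omega
    have hscan := chkB_scan_eq t PySem.Set.empty i hi' hin
    rw [if_neg (show ¬ ((L.length : Int) > (t.length : Int) - i) by omega)]
    rw [hscan, ← hm]
    by_cases hmw : (m : Int) < (L.length : Int)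
    · rw [if_pos (show i + (m : Int) - i < (L.length : Int) by omega),
          if_pos (Or.inr hmw), ofList_toList]
    · rw [if_neg (show ¬ (i + (m : Int) - i < (L.length : Int)) by omega),
          if_neg (show ¬ ((t.length : Int) - i < (L.length : Int) ∨ (m : Int) < (L.length : Int)) by omega)]
      congr 1
      rw [PySem.List.slice_toNat t hi' (by omega)]
      congr 1
      omega
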